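-- pv_equiv track=rewrite | github.com/Lui105/VINF_crawler | extractor.py | disambiguate_headlines
-- ===== SOURCE A (Python) =====
-- def disambiguate_headlines(tables: list) -> list:
--     seen = {}
--     for t in tables:
--         h = t["headline"]
--         count = seen.get(h, 0)
--         if count == 1:
--             t["headline"] = f"{h} Playoffs"
--         seen[h] = count + 1
--     return tables
-- ===== SOURCE B (Python) =====
-- def disambiguate_headlines(tables: list) -> list:
--     # Two staged passes: group row indices by original headline, then patch the
--     # second occurrence of each duplicated headline in place (same mutation as A).
--     heads = [t["headline"] for t in tables]
--     for h in dict.fromkeys(heads):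
--         idxs = [i for i, x in enumerate(heads) if x == h]
--         if len(idxs) > 1:
--             tables[idxs[1]]["headline"] = f"{h} Playoffs"
--     return tables
-- ===== Notes on version B (the rewrite author's own statement) =====
-- stated objective: alternative
-- what changed: Replaces the single sequential pass with a running seen-counter by two staged passes: group row indices by original headline (over the distinct headlines, dict.fromkeys order), then patch the second index of each group with more than one occurrence by direct indexed assignment.
import Mathlib
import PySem

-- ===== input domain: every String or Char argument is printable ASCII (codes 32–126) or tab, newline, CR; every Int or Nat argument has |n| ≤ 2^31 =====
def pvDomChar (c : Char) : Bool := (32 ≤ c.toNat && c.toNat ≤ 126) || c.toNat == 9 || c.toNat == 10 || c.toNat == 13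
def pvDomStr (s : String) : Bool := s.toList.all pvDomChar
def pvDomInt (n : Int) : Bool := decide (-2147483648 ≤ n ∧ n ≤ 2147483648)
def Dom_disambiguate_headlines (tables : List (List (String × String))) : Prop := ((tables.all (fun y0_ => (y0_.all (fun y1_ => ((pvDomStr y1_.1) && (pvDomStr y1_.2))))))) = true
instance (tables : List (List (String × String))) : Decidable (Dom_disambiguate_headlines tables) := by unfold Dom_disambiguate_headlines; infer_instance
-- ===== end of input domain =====

-- B groups row indices by original headline (two staged passes) instead of A's single
-- sequential pass with a running seen-counter; same return value (both Pythons also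
-- mutate the row dicts in place identically — the equivalence proved is about the
-- return value).

-- the "headline" value of a row, as both ports read it (Pre_ guarantees the key exists)
def pvHd (t : List (String × String)) : String := ((PySem.Dict.mk t).get? "headline").getD ""

-- ===== PORT A =====
-- the for-loop over `tables` with the running `seen` counter dict, as structural
-- recursion carrying `seen`
def pvALoop (seen : PySem.Dict String Int) : List (List (String × String)) → List (List (String × String))
  | [] => []
  | t :: ts =>
    let h := pvHd t
    let count := seen.getD h 0
    let t' := if count = 1 then ((PySem.Dict.mk t).insert "headline" (h ++ " Playoffs")).items else t
    t' :: pvALoop (seen.insert h (count + 1)) ts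

def disambiguate_headlines (tables : List (List (String × String))) : List (List (String × String)) :=
  pvALoop PySem.Dict.empty tables

-- ===== PORT B =====
-- [i for i, x in enumerate(heads) if x == h]
def pvIdxs (heads : List String) (h : String) : List Int :=
  ((PySem.List.enumerate heads 0).filter (fun p => p.2 == h)).map (fun p => p.1)

-- body of `for h in dict.fromkeys(heads)`; the indexings idxs[1] and tables[idxs[1]]
-- are in range in Python (len(idxs) > 1 and idxs ⊆ range(len(tables))), so the
-- total pyGetD/pySetD forms are exact here
def pvBStep (heads : List String) (acc : List (List (String × String))) (h : String) :
    List (List (String × String)) :=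
  let idxs := pvIdxs heads h
  if 1 < idxs.length then
    let j := PySem.List.pyGetD idxs 1 0
    let row := PySem.List.pyGetD acc j []
    PySem.List.pySetD acc j (((PySem.Dict.mk row).insert "headline" (h ++ " Playoffs")).items)
  else acc

def disambiguate_headlines_alt (tables : List (List (String × String))) : List (List (String × String)) :=
  let heads := tables.map pvHd
  (PySem.List.dedup heads).foldl (pvBStep heads) tables

-- ===== PRECONDITION & SPEC =====
-- Pre_ excludes tables in which some row lacks the "headline" key: there Python A
-- (and B) raise KeyError instead of returning.
def Pre_disambiguate_headlines (tables : List (List (String × String))) : Prop :=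
  ∀ t ∈ tables, "headline" ∈ t.map Prod.fst

instance (tables : List (List (String × String))) : Decidable (Pre_disambiguate_headlines tables) := by
  unfold Pre_disambiguate_headlines; infer_instance

def pvWitness_disambiguate_headlines : (List (List (String × String))) :=
  [[("headline", "A"), ("year", "1999")], [("headline", "A")], [("headline", "B")]]

def Spec_disambiguate_headlines (tables : List (List (String × String))) (out : List (List (String × String))) : Prop := out = disambiguate_headlines_alt tables
instance (tables : List (List (String × String))) (out : List (List (String × String))) : Decidable (Spec_disambiguate_headlines tables out) := by unfold Spec_disambiguate_headlines; infer_instance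

-- ===== CLAIM (what is proved, stated in full; the proofs are below) =====
def Claim_equal_disambiguate_headlines : Prop := ∀ (tables : List (List (String × String))), Dom_disambiguate_headlines tables → Pre_disambiguate_headlines tables → Spec_disambiguate_headlines tables (disambiguate_headlines tables)

-- ===== LEMMAS AND PROOFS =====

-- the renamed row: t["headline"] = f"{h} Playoffs" with h = the row's own headline
def pvUpd (t : List (String × String)) : List (String × String) :=
  ((PySem.Dict.mk t).insert "headline" (pvHd t ++ " Playoffs")).items

-- A-side reference: process ts given the list P of original headlines already seen
def pvRef (P : List String) : List (List (String × String)) → List (List (String × String))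
  | [] => []
  | t :: ts => (if P.count (pvHd t) = 1 then pvUpd t else t) :: pvRef (P ++ [pvHd t]) ts

lemma pvALoop_eq_ref (ts : List (List (String × String))) :
    ∀ (seen : PySem.Dict String Int) (P : List String),
    (∀ h, seen.getD h 0 = (P.count h : Int)) → pvALoop seen ts = pvRef P ts := by
  induction ts with
  | nil => intro seen P _; rfl
  | cons t ts ih =>
    intro seen P hinv
    show (if seen.getD (pvHd t) 0 = 1 then pvUpd t else t) ::
          pvALoop (seen.insert (pvHd t) (seen.getD (pvHd t) 0 + 1)) ts
        = (if P.count (pvHd t) = 1 then pvUpd t else t) :: pvRef (P ++ [pvHd t]) ts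
    rw [hinv (pvHd t)]
    congr 1
    · by_cases h1 : P.count (pvHd t) = 1
      · rw [h1]; norm_num
      · rw [if_neg (by exact_mod_cast h1), if_neg h1]
    · apply ih
      intro h
      rw [PySem.Dict.getD_insert, hinv h, List.count_append]
      by_cases he : h = pvHd t
      · subst he; rw [if_pos rfl]; simp
      · rw [if_neg he]; simp [Ne.symm he]

lemma pvRef_length (ts : List (List (String × String))) :
    ∀ P, (pvRef P ts).length = ts.length := by
  induction ts with
  | nil => intro P; rfl
  | cons t ts ih => intro P; simp [pvRef, ih]

lemma pvRef_getElem (ts : List (List (String × String))) :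
    ∀ (P : List String) (i : Nat) (hi : i < ts.length),
    (pvRef P ts)[i]'(by rw [pvRef_length]; exact hi)
      = if (P ++ (ts.map pvHd).take i).count (pvHd ts[i]) = 1 then pvUpd ts[i] else ts[i] := by
  induction ts with
  | nil => intro P i hi; exact absurd hi (by simp)
  | cons t ts ih =>
    intro P i hi
    match i with
    | 0 => simp [pvRef]
    | Nat.succ i =>
      have hi' : i < ts.length := by simpa using hi
      have := ih (P ++ [pvHd t]) i hi'
      simpa [pvRef, List.append_assoc] using this

-- the k-th recorded index of h: explicit description (index, element, prior count)
lemma idx_get? (xs : List String) (h : String) :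
    ∀ (s : Int) (k : Nat) (i : Int),
    ((((PySem.List.enumerate xs s).filter (fun p => p.2 == h)).map (fun p => p.1))[k]? = some i ↔
      ∃ (m : Nat) (hm : m < xs.length), i = s + m ∧ xs[m] = h ∧ (xs.take m).count h = k) := by
  induction xs with
  | nil => intro s k i; simp
  | cons x xs ih =>
    intro s k i
    by_cases hx : x = h
    · subst hx
      match k with
      | 0 =>
        simp only [PySem.List.enumerate_cons, List.filter_cons, BEq.rfl, if_pos, List.map_cons,
          List.getElem?_cons_zero]
        constructor
        · intro h'
          have hi : i = s := by exact (Option.some_inj.mp h').symm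
          exact ⟨0, by simp, by simp [hi], by simp, by simp⟩
        · rintro ⟨m, hm, rfl, hel, hcnt⟩
          match m with
          | 0 => simp
          | Nat.succ m =>
            exfalso
            rw [List.take_succ_cons, List.count_cons_self] at hcnt
            omega
      | Nat.succ k =>
        simp only [PySem.List.enumerate_cons, List.filter_cons, BEq.rfl, if_pos, List.map_cons,
          List.getElem?_cons_succ]
        rw [ih (s+1) k i]
        constructor
        · rintro ⟨m, hm, rfl, hel, hcnt⟩
          exact ⟨m+1, by simpa using hm, by push_cast; ring, by simpa using hel,
            by rw [List.take_succ_cons, List.count_cons_self, hcnt]⟩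
        · rintro ⟨m, hm, rfl, hel, hcnt⟩
          match m with
          | 0 => simp at hcnt
          | Nat.succ m =>
            refine ⟨m, by simpa using hm, by push_cast; ring, by simpa using hel, ?_⟩
            rw [List.take_succ_cons, List.count_cons_self] at hcnt
            omega
    · have hbeq : (x == h) = false := by simpa using hx
      simp only [PySem.List.enumerate_cons, List.filter_cons, hbeq, Bool.false_eq_true,
        if_neg, not_false_iff]
      rw [ih (s+1) k i]
      constructor
      · rintro ⟨m, hm, rfl, hel, hcnt⟩
        exact ⟨m+1, by simpa using hm, by push_cast; ring, by simpa using hel,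
          by rw [List.take_succ_cons, List.count_cons_of_ne hx, hcnt]⟩
      · rintro ⟨m, hm, rfl, hel, hcnt⟩
        match m with
        | 0 =>
          exfalso
          simp only [List.getElem_cons_zero] at hel
          exact hx hel
        | Nat.succ m =>
          refine ⟨m, by simpa using hm, by push_cast; ring, by simpa using hel, ?_⟩
          rw [List.take_succ_cons, List.count_cons_of_ne hx] at hcnt
          exact hcnt

lemma idx_length (xs : List String) (h : String) :
    ∀ s : Int,
    (((PySem.List.enumerate xs s).filter (fun p => p.2 == h)).map (fun p => p.1)).length
      = xs.count h := by
  induction xs with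
  | nil => intro s; simp
  | cons x xs ih =>
    intro s
    by_cases hx : x = h
    · subst hx
      simp [PySem.List.enumerate_cons, ih (s+1), List.count_cons_self]
    · have hbeq : (x == h) = false := by simpa using hx
      simp [PySem.List.enumerate_cons, hbeq, ih (s+1), List.count_cons_of_ne hx]

lemma count_ge_two_of_cond (heads : List String) (i : Nat) (hi : i < heads.length)
    (hc : (heads.take i).count heads[i] = 1) : 2 ≤ heads.count heads[i] := by
  have hmem : heads[i] ∈ heads.drop i := by
    have h0 : (heads.drop i)[0]'(by simp; omega) = heads[i] := by
      simp
    exact h0 ▸ List.getElem_mem _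
  have h1 : 1 ≤ (heads.drop i).count heads[i] := List.one_le_count_iff.mpr hmem
  have h2 : (heads.take i).count heads[i] + (heads.drop i).count heads[i] = heads.count heads[i] := by
    rw [← List.count_append, List.take_append_drop]
  omega

lemma pvIdxs_get? (heads : List String) (h : String) (k : Nat) (i : Int) :
    (pvIdxs heads h)[k]? = some i ↔
      ∃ (m : Nat) (hm : m < heads.length), i = (m : Int) ∧ heads[m] = h ∧ (heads.take m).count h = k := by
  unfold pvIdxs
  rw [idx_get? heads h 0 k i]
  simp

lemma pvIdxs_length (heads : List String) (h : String) :
    (pvIdxs heads h).length = heads.count h := idx_length heads h 0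

lemma pvBStep_def (heads : List String) (acc : List (List (String × String))) (h : String) :
    pvBStep heads acc h =
      if 1 < (pvIdxs heads h).length then
        PySem.List.pySetD acc (PySem.List.pyGetD (pvIdxs heads h) 1 0)
          (((PySem.Dict.mk (PySem.List.pyGetD acc (PySem.List.pyGetD (pvIdxs heads h) 1 0) [])).insert
            "headline" (h ++ " Playoffs")).items)
      else acc := rfl

lemma bstep_length (heads : List String) (acc : List (List (String × String))) (h : String) :
    (pvBStep heads acc h).length = acc.length := by
  rw [pvBStep_def]
  by_cases hl : 1 < (pvIdxs heads h).length
  · rw [if_pos hl]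
    obtain ⟨j, hj⟩ : ∃ j, (pvIdxs heads h)[1]? = some j :=
      ⟨_, List.getElem?_eq_getElem hl⟩
    obtain ⟨m, hm, rfl, hel, hcnt⟩ := (pvIdxs_get? heads h 1 j).mp hj
    have : PySem.List.pyGetD (pvIdxs heads h) 1 0 = (m : Int) := by
      rw [PySem.List.pyGetD_ofNat' (pvIdxs heads h) 1 0, List.getD_eq_getElem _ _ hl]
      exact Option.some_inj.mp ((List.getElem?_eq_getElem hl).symm.trans hj)
    rw [this, PySem.List.pySetD_natCast]
    simp
  · rw [if_neg hl]

-- one pvBStep, described pointwise: it rewrites exactly the second occurrence of h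
lemma bstep_get (heads : List String) (acc : List (List (String × String))) (h : String)
    (hlen : acc.length = heads.length) (i : Nat) (hi : i < heads.length) :
    (pvBStep heads acc h)[i]? =
      if heads[i] = h ∧ (heads.take i).count heads[i] = 1
      then some (((PySem.Dict.mk (acc[i]'(by omega))).insert "headline" (h ++ " Playoffs")).items)
      else acc[i]? := by
  rw [pvBStep_def]
  by_cases hlen2 : 1 < (pvIdxs heads h).length
  · rw [if_pos hlen2]
    have hj : (pvIdxs heads h)[1]? = some ((pvIdxs heads h)[1]'hlen2) :=
      List.getElem?_eq_getElem hlen2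
    obtain ⟨m, hm, hjm, hel, hcnt⟩ := (pvIdxs_get? heads h 1 _).mp hj
    have hgd : PySem.List.pyGetD (pvIdxs heads h) 1 0 = (m : Int) := by
      rw [PySem.List.pyGetD_ofNat' (pvIdxs heads h) 1 0, List.getD_eq_getElem _ _ hlen2]; exact hjm
    rw [hgd]
    rw [PySem.List.pySetD_natCast]
    rw [List.getElem?_set]
    by_cases hcase : heads[i] = h ∧ (heads.take i).count heads[i] = 1
    · have him : (pvIdxs heads h)[1]? = some (i : Int) := by
        rw [pvIdxs_get?]
        exact ⟨i, hi, rfl, hcase.1, by rw [← hcase.1]; exact hcase.2⟩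
      have : ((m : Int)) = (i : Int) := by
        rw [hj, hjm] at him; exact (Option.some_inj.mp him)
      have hmi : m = i := by exact_mod_cast this
      subst hmi
      rw [if_pos rfl, if_pos hcase, if_pos (by omega)]
      have hrow : PySem.List.pyGetD acc (m : Int) [] = acc[m]'(by omega) := by
        rw [PySem.List.pyGetD_natCast]
        exact List.getD_eq_getElem _ _ (by omega)
      rw [hrow]
    · have hne : m ≠ i := by
        intro hmi; subst hmi
        exact hcase ⟨hel, by rw [hel]; exact hcnt⟩
      rw [if_neg hne, if_neg hcase]
  · rw [if_neg hlen2]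
    have hno : ¬ (heads[i] = h ∧ (heads.take i).count heads[i] = 1) := by
      rintro ⟨hel, hcnt⟩
      have := count_ge_two_of_cond heads i hi hcnt
      rw [hel] at this
      rw [pvIdxs_length] at hlen2
      omega
    rw [if_neg hno]

-- the whole B-side fold, characterised pointwise
lemma foldl_bstep (tables : List (List (String × String))) :
    ∀ (D : List String) (acc : List (List (String × String))),
    D.Nodup →
    ∀ (hlen : acc.length = tables.length),
    (∀ k (hk : k < tables.length), pvHd tables[k] ∈ D → acc[k]'(by omega) = tables[k]) →
    (D.foldl (pvBStep (tables.map pvHd)) acc).length = tables.length ∧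
    ∀ i (hi : i < tables.length),
      (D.foldl (pvBStep (tables.map pvHd)) acc)[i]? =
        some (if pvHd tables[i] ∈ D ∧ ((tables.map pvHd).take i).count (pvHd tables[i]) = 1
          then pvUpd tables[i] else acc[i]'(by omega)) := by
  intro D
  induction D with
  | nil =>
    intro acc _ hlen hagree
    refine ⟨hlen, fun i hi => ?_⟩
    simp [List.getElem?_eq_getElem (by omega : i < acc.length)]
  | cons h D ih =>
    intro acc hnd hlen hagree
    have hhD : h ∉ D := (List.nodup_cons.mp hnd).1
    have hndD : D.Nodup := (List.nodup_cons.mp hnd).2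
    set heads := tables.map pvHd with hheads
    have hlenh : heads.length = tables.length := by simp [hheads]
    have hgh : ∀ k (hk : k < tables.length), heads[k]'(by omega) = pvHd tables[k] := by
      intro k hk; simp [hheads]
    have hlen' : (pvBStep heads acc h).length = tables.length := by
      rw [bstep_length]; exact hlen
    have hagree' : ∀ k (hk : k < tables.length), pvHd tables[k] ∈ D →
        (pvBStep heads acc h)[k]'(by omega) = tables[k] := by
      intro k hk hkD
      have hne : ¬ (heads[k]'(by omega) = h ∧ ((heads.take k).count (heads[k]'(by omega)) = 1)) := by
        rintro ⟨he, _⟩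
        rw [hgh k hk] at he
        exact hhD (he ▸ hkD)
      have := bstep_get heads acc h (by omega) k (by omega)
      rw [if_neg hne] at this
      have h2 : (pvBStep heads acc h)[k]? = some ((pvBStep heads acc h)[k]'(by omega)) :=
        List.getElem?_eq_getElem _
      rw [h2, List.getElem?_eq_getElem (by omega : k < acc.length)] at this
      have := Option.some_inj.mp this
      rw [this]
      exact hagree k hk (List.mem_cons_of_mem _ hkD)
    obtain ⟨ihlen, ihget⟩ := ih (pvBStep heads acc h) hndD hlen' hagree'
    rw [List.foldl_cons]
    refine ⟨ihlen, fun i hi => ?_⟩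
    rw [ihget i hi]
    have hstep := bstep_get heads acc h (by omega) i (by omega)
    have hgi := hgh i hi
    by_cases hmemD : pvHd tables[i] ∈ D
    · have hmemhD : pvHd tables[i] ∈ h :: D := List.mem_cons_of_mem _ hmemD
      have hneq : pvHd tables[i] ≠ h := fun he => hhD (he ▸ hmemD)
      by_cases hcond : (heads.take i).count (pvHd tables[i]) = 1
      · rw [if_pos ⟨hmemD, hcond⟩, if_pos ⟨hmemhD, hcond⟩]
      · rw [if_neg (fun hc => hcond hc.2), if_neg (fun hc => hcond hc.2)]
        congr 1
        have hne : ¬ (heads[i]'(by omega) = h ∧ ((heads.take i).count (heads[i]'(by omega)) = 1)) := by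
          rw [hgi]; rintro ⟨he, _⟩; exact hneq he
        rw [if_neg hne, List.getElem?_eq_getElem (by omega : i < acc.length)] at hstep
        have h2 : (pvBStep heads acc h)[i]? = some ((pvBStep heads acc h)[i]'(by omega)) :=
          List.getElem?_eq_getElem _
        rw [h2] at hstep
        exact Option.some_inj.mp hstep
    · by_cases hih : pvHd tables[i] = h
      · have hmemhD : pvHd tables[i] ∈ h :: D := by rw [hih]; exact List.mem_cons_self
        by_cases hcond : (heads.take i).count (pvHd tables[i]) = 1
        · rw [if_neg (fun hc => hmemD hc.1), if_pos ⟨hmemhD, hcond⟩]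
          congr 1
          have hyes : (heads[i]'(by omega) = h ∧ ((heads.take i).count (heads[i]'(by omega)) = 1)) := by
            rw [hgi]; exact ⟨hih, hcond⟩
          rw [if_pos hyes] at hstep
          have h2 : (pvBStep heads acc h)[i]? = some ((pvBStep heads acc h)[i]'(by omega)) :=
            List.getElem?_eq_getElem _
          rw [h2] at hstep
          have hacc : acc[i]'(by omega) = tables[i] := hagree i hi hmemhD
          rw [hacc] at hstep
          have := Option.some_inj.mp hstep
          rw [this]
          unfold pvUpd
          rw [hih]
        · rw [if_neg (fun hc => hmemD hc.1), if_neg (fun hc => hcond hc.2)]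
          congr 1
          have hne : ¬ (heads[i]'(by omega) = h ∧ ((heads.take i).count (heads[i]'(by omega)) = 1)) := by
            rw [hgi]; rintro ⟨_, hc⟩; exact hcond hc
          rw [if_neg hne, List.getElem?_eq_getElem (by omega : i < acc.length)] at hstep
          have h2 : (pvBStep heads acc h)[i]? = some ((pvBStep heads acc h)[i]'(by omega)) :=
            List.getElem?_eq_getElem _
          rw [h2] at hstep
          exact Option.some_inj.mp hstep
      · have hnm : pvHd tables[i] ∉ h :: D := by
          rw [List.mem_cons]; rintro (hc | hc); exact hih hc; exact hmemD hc
        rw [if_neg (fun hc => hmemD hc.1), if_neg (fun hc => hnm hc.1)]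
        congr 1
        have hne : ¬ (heads[i]'(by omega) = h ∧ ((heads.take i).count (heads[i]'(by omega)) = 1)) := by
          rw [hgi]; rintro ⟨he, _⟩; exact hih he
        rw [if_neg hne, List.getElem?_eq_getElem (by omega : i < acc.length)] at hstep
        have h2 : (pvBStep heads acc h)[i]? = some ((pvBStep heads acc h)[i]'(by omega)) :=
          List.getElem?_eq_getElem _
        rw [h2] at hstep
        exact Option.some_inj.mp hstep

-- ===== VERDICT (by name: the statement is the Claim_ definition above) =====
theorem disambiguate_headlines_spec : Claim_equal_disambiguate_headlines := by
  intro tables _ _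
  show disambiguate_headlines tables = disambiguate_headlines_alt tables
  have hA : disambiguate_headlines tables = pvRef [] tables :=
    pvALoop_eq_ref tables PySem.Dict.empty [] (by intro h; simp [PySem.Dict.getD_empty])
  have hBdef : disambiguate_headlines_alt tables
      = (PySem.List.dedup (tables.map pvHd)).foldl (pvBStep (tables.map pvHd)) tables := rfl
  obtain ⟨hBlen, hBget⟩ := foldl_bstep tables (PySem.List.dedup (tables.map pvHd)) tables
    (PySem.List.nodup_dedup _) rfl (fun k hk _ => rfl)
  rw [hA, hBdef]
  apply List.ext_getElem?
  intro i
  by_cases hi : i < tables.length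
  · rw [List.getElem?_eq_getElem (show i < (pvRef [] tables).length by rw [pvRef_length]; exact hi)]
    rw [hBget i hi]
    rw [pvRef_getElem tables [] i hi]
    have hmem : pvHd tables[i] ∈ PySem.List.dedup (tables.map pvHd) := by
      rw [PySem.List.mem_dedup]
      exact List.mem_map.mpr ⟨tables[i], List.getElem_mem _, rfl⟩
    by_cases hcond : ((tables.map pvHd).take i).count (pvHd tables[i]) = 1
    · rw [if_pos (by simpa using hcond), if_pos ⟨hmem, hcond⟩]
    · rw [if_neg (by simpa using hcond), if_neg (fun hc => hcond hc.2)]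
  · rw [List.getElem?_eq_none (show (pvRef [] tables).length ≤ i by rw [pvRef_length]; omega)]
    rw [List.getElem?_eq_none (by omega : ((PySem.List.dedup (tables.map pvHd)).foldl (pvBStep (tables.map pvHd)) tables).length ≤ i)]
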